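-- pv_equiv track=rewrite | github.com/Priscasantos/LANDAGRI-B_Dashboard | dashboard/temporal/temporal.py | calculate_largest_gap
-- ===== SOURCE A (Python) =====
-- def calculate_largest_gap(anos_list):
--     """Calculate the largest consecutive gap in a list of years"""
--     if len(anos_list) <= 1:
--         return 0
--
--     anos_sorted = sorted(anos_list)
--     gaps = []
--
--     for i in range(len(anos_sorted) - 1):
--         gap = anos_sorted[i + 1] - anos_sorted[i] - 1
--         if gap > 0:
--             gaps.append(gap)
--
--     return max(gaps) if gaps else 0
-- ===== SOURCE B (Python) =====
-- def calculate_largest_gap(anos_list):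
--     """Largest consecutive gap: for each distinct year, the run of missing
--     years up to its closest larger year; no sorting, no guard needed."""
--     years = set(anos_list)
--     best = 0
--     for x in years:
--         gap = None
--         for y in years:
--             if y > x and (gap is None or y - x - 1 < gap):
--                 gap = y - x - 1
--         if gap is not None and gap > best:
--             best = gap
--     return best
-- ===== Notes on version B (the rewrite author's own statement) =====
-- stated objective: alternative
-- what changed: Instead of sorting and scanning adjacent pairs, B builds a set of the years and for each year finds its closest larger year by a direct scan, taking the maximum missing-run; no sort, no length guard, no gap list.
import Mathlib
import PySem

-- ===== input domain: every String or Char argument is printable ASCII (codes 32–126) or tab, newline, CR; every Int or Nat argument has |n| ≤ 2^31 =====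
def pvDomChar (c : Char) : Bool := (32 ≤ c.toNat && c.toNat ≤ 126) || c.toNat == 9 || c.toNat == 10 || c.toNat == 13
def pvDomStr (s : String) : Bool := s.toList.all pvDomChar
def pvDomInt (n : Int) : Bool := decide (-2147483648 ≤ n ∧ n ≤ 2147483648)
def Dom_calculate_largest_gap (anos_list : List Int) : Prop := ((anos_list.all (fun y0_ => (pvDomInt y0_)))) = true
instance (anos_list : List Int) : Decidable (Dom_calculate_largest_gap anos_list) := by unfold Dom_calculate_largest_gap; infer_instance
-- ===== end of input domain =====

-- B replaces A's sort + adjacent-pair scan by a set with a closest-larger-year scan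
-- per distinct year (a genuinely different algorithm of similar cost; not claimed faster).

-- ===== PORT A =====
def calculate_largest_gap (anos_list : List Int) : Int :=
  if anos_list.length ≤ 1 then 0
  else
    let anos_sorted := PySem.List.sorted anos_list (fun x => x) false
    let gaps := (PySem.List.pyRange 0 ((anos_sorted.length : Int) - 1) 1).foldl
      (fun gaps i =>
        let gap := PySem.List.pyGetD anos_sorted (i + 1) 0 - PySem.List.pyGetD anos_sorted i 0 - 1
        if gap > 0 then gaps ++ [gap] else gaps) []
    if gaps ≠ [] then (PySem.List.max? gaps (fun x => x)).getD 0 else 0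

-- ===== PORT B =====
def calculate_largest_gap_alt (anos_list : List Int) : Int :=
  let years := PySem.Set.ofList anos_list
  years.foldl (fun best x =>
    let gap := years.foldl (fun gap y =>
      if y > x then
        match gap with
        | none => some (y - x - 1)
        | some g => if y - x - 1 < g then some (y - x - 1) else some g
      else gap) none
    match gap with
    | none => best
    | some g => if g > best then g else best) 0

-- ===== PRECONDITION & SPEC =====
def Spec_calculate_largest_gap (anos_list : List Int) (out : Int) : Prop := out = calculate_largest_gap_alt anos_list
instance (anos_list : List Int) (out : Int) : Decidable (Spec_calculate_largest_gap anos_list out) := by unfold Spec_calculate_largest_gap; infer_instance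

-- ===== CLAIM (what is proved, stated in full; the proofs are below) =====
def Claim_equal_calculate_largest_gap : Prop := ∀ (anos_list : List Int), Dom_calculate_largest_gap anos_list → Spec_calculate_largest_gap anos_list (calculate_largest_gap anos_list)

-- ===== LEMMAS AND PROOFS =====

/-- Adjacent "missing run" sizes of a list: `adj [a,b,c] = [b-a-1, c-b-1]`. -/
def adj : List Int → List Int
  | a :: b :: t => (b - a - 1) :: adj (b :: t)
  | _ => []

/-- Maximum of a list of ints, floored at 0. -/
def bigmax (l : List Int) : Int := l.foldl max 0

/-- Collapse consecutive duplicates (on a sorted list: the strictly sorted member list). -/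
def dd : List Int → List Int
  | a :: b :: t => if a = b then dd (b :: t) else a :: dd (b :: t)
  | l => l

/-- Candidate gaps of `x` w.r.t. member list `ys`: `y - x - 1` for each `y ∈ ys` above `x`. -/
def cands (ys : List Int) (x : Int) : List Int :=
  (ys.filter (fun y => x < y)).map (fun y => y - x - 1)

/-- The gap B computes for `x`: smallest candidate, `0` if there is none. -/
def cval (ys : List Int) (x : Int) : Int :=
  match cands ys x with
  | [] => 0
  | v :: r => r.foldl min v

/-- One inner step of B, as an option-min accumulator. -/
def om (o : Option Int) (v : Int) : Option Int :=
  some (match o with | none => v | some g => min g v)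

theorem bigmax_nonneg (l : List Int) : 0 ≤ bigmax l := (PySem.List.le_foldl_max l 0).1

theorem foldl_max_of_nonneg (l : List Int) : ∀ c : Int, 0 ≤ c → l.foldl max c = max c (bigmax l) := by
  induction l with
  | nil => intro c _; simp [bigmax]; omega
  | cons x t ih =>
    intro c hc
    have h1 := ih (max c x) (le_trans hc (le_max_left _ _))
    have h2 := ih (max 0 x) (le_max_left _ _)
    simp only [List.foldl_cons, bigmax] at *
    rw [h1, h2]
    rcases le_total (bigmax t) 0 with h | h <;>
      simp [bigmax] at * <;> omega

theorem bigmax_cons (x : Int) (l : List Int) : bigmax (x :: l) = max x (bigmax l) := by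
  have := foldl_max_of_nonneg l (max 0 x) (le_max_left _ _)
  simp only [bigmax, List.foldl_cons] at *
  rw [this]
  have := bigmax_nonneg l
  simp [bigmax] at *; omega

theorem bigmax_perm {l l' : List Int} (h : l.Perm l') : bigmax l = bigmax l' := by
  induction h with
  | nil => rfl
  | cons x _ ih => rw [bigmax_cons, bigmax_cons, ih]
  | swap x y l => rw [bigmax_cons, bigmax_cons, bigmax_cons, bigmax_cons]; omega
  | trans _ _ ih1 ih2 => rw [ih1, ih2]

theorem bigmax_filter_pos (l : List Int) : bigmax l = bigmax (l.filter (fun v => 0 < v)) := by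
  induction l with
  | nil => rfl
  | cons x t ih =>
    by_cases hx : (0:Int) < x
    · simp [hx, bigmax_cons, ih]
    · have := bigmax_nonneg t
      simp [hx, bigmax_cons, ← ih]
      omega

theorem adj_len_le_one {l : List Int} (h : l.length ≤ 1) : adj l = [] := by
  match l with
  | [] => rfl
  | [a] => rfl
  | a :: b :: t => simp at h

theorem adj_length (s : List Int) : (adj s).length = s.length - 1 := by
  induction s with
  | nil => rfl
  | cons a t ih =>
    match t, ih with
    | [], _ => rfl
    | b :: t, ih => simp [adj] at *; omega

theorem adj_getElem (s : List Int) (k : Nat) (hk : k < (adj s).length) :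
    (adj s)[k] = s[k+1]'(by rw [adj_length] at hk; omega) - s[k]'(by rw [adj_length] at hk; omega) - 1 := by
  induction s generalizing k with
  | nil => simp [adj] at hk
  | cons a t ih =>
    match t with
    | [] => simp [adj] at hk
    | b :: t =>
      match k with
      | 0 => rfl
      | k + 1 =>
        have hk' : k < (adj (b :: t)).length := by simpa [adj] using hk
        simpa using ih k hk'

theorem map_range_adj (s : List Int) :
    (PySem.List.pyRange 0 ((s.length : Int) - 1) 1).map
      (fun i => PySem.List.pyGetD s (i + 1) 0 - PySem.List.pyGetD s i 0 - 1) = adj s := by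
  apply List.ext_getElem
  · rw [List.length_map, PySem.List.length_pyRange_one, adj_length]; omega
  · intro k h1 h2
    rw [List.getElem_map, PySem.List.getElem_pyRange_one]
    have hkk : k < (adj s).length := h2
    rw [adj_length] at hkk
    have e1 : (0 : Int) + (k : Int) + 1 = ((k + 1 : Nat) : Int) := by push_cast; ring
    have e0 : (0 : Int) + (k : Int) = ((k : Nat) : Int) := by norm_num
    rw [e1, PySem.List.pyGetD_natCast, e0, PySem.List.pyGetD_natCast, adj_getElem s k h2,
      List.getD_eq_getElem s 0 (by omega), List.getD_eq_getElem s 0 (by omega)]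

theorem gaps_eq (L : List Int) :
    (PySem.List.pyRange 0 ((L.length : Int) - 1) 1).foldl
      (fun gaps i =>
        if PySem.List.pyGetD L (i + 1) 0 - PySem.List.pyGetD L i 0 - 1 > 0 then
          gaps ++ [PySem.List.pyGetD L (i + 1) 0 - PySem.List.pyGetD L i 0 - 1]
        else gaps) []
    = ((PySem.List.pyRange 0 ((L.length : Int) - 1) 1).map
        (fun i => PySem.List.pyGetD L (i + 1) 0 - PySem.List.pyGetD L i 0 - 1)).filter
        (fun v => decide (0 < v)) := by
  rw [List.filter_map]
  have h := PySem.List.foldl_append_if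
    (l := PySem.List.pyRange 0 ((L.length : Int) - 1) 1)
    (p := fun i => decide (0 < PySem.List.pyGetD L (i + 1) 0 - PySem.List.pyGetD L i 0 - 1))
    (f := fun i => PySem.List.pyGetD L (i + 1) 0 - PySem.List.pyGetD L i 0 - 1)
    (acc := [])
  simpa [Function.comp_def] using h

theorem A_eq (xs : List Int) :
    calculate_largest_gap xs = bigmax (adj (PySem.List.sorted xs (fun x => x) false)) := by
  by_cases hlen : xs.length ≤ 1
  · have hL : (PySem.List.sorted xs (fun x => x) false).length ≤ 1 := by
      rw [PySem.List.length_sorted]; exact hlen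
    simp only [calculate_largest_gap]
    rw [if_pos hlen, adj_len_le_one hL]
    rfl
  · simp only [calculate_largest_gap]
    rw [if_neg hlen, gaps_eq, map_range_adj]
    rcases hF : (adj (PySem.List.sorted xs (fun x => x) false)).filter (fun v => decide (0 < v)) with _ | ⟨v, r⟩
    · rw [if_neg (by simp), bigmax_filter_pos, hF]
      rfl
    · have hv : (0:Int) < v := by
        have hm : v ∈ (adj (PySem.List.sorted xs (fun x => x) false)).filter (fun v => decide (0 < v)) := by
          rw [hF]; simp
        simpa using (List.mem_filter.mp hm).2
      rw [if_pos (by simp), PySem.List.max?_id_cons, Option.getD_some,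
        foldl_max_of_nonneg r v (le_of_lt hv), ← bigmax_cons, ← hF, ← bigmax_filter_pos]

theorem mem_cands {ys : List Int} {x v : Int} : v ∈ cands ys x ↔ x < v + x + 1 ∧ v + x + 1 ∈ ys := by
  simp only [cands, List.mem_map, List.mem_filter]
  constructor
  · rintro ⟨y, ⟨hy, hlt⟩, rfl⟩
    have he : y - x - 1 + x + 1 = y := by ring
    rw [he]; exact ⟨by simpa using hlt, hy⟩
  · rintro ⟨h1, h2⟩; exact ⟨v + x + 1, ⟨h2, by simpa using h1⟩, by ring⟩

theorem cands_cons_pos {a x : Int} {ys : List Int} (h : x < a) :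
    cands (a :: ys) x = (a - x - 1) :: cands ys x := by simp [cands, h]

theorem cands_cons_neg {a x : Int} {ys : List Int} (h : ¬ x < a) :
    cands (a :: ys) x = cands ys x := by simp [cands, h]

theorem minfold_spec (r : List Int) : ∀ v : Int, r.foldl min v ∈ v :: r ∧ ∀ a ∈ v :: r, r.foldl min v ≤ a := by
  induction r with
  | nil => intro v; simp
  | cons b r ih =>
    intro v
    obtain ⟨hmem, hlb⟩ := ih (min v b)
    refine ⟨?_, ?_⟩
    · simp only [List.foldl_cons]
      rcases List.mem_cons.mp hmem with h | h
      · rw [h]; rcases le_total v b with hvb | hvb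
        · simp [min_eq_left hvb]
        · simp [min_eq_right hvb]
      · simp [h]
    · intro a ha
      simp only [List.foldl_cons]
      have h0 : List.foldl min (min v b) r ≤ min v b := hlb _ (by simp)
      rcases List.mem_cons.mp ha with rfl | ha2
      · omega
      · rcases List.mem_cons.mp ha2 with rfl | ha3
        · omega
        · exact hlb a (by simp [ha3])

theorem foldl_min_eq_of_le {r : List Int} {c : Int} (h : ∀ v ∈ r, c ≤ v) : r.foldl min c = c := by
  induction r generalizing c with
  | nil => rfl
  | cons b r ih =>
    have hcb : c ≤ b := h b (by simp)
    simp only [List.foldl_cons, min_eq_left hcb]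
    exact ih (fun v hv => h v (by simp [hv]))

theorem cval_congr {ys zs : List Int} (h : ∀ a, a ∈ ys ↔ a ∈ zs) (x : Int) :
    cval ys x = cval zs x := by
  have hc : ∀ v, v ∈ cands ys x ↔ v ∈ cands zs x := by
    intro v; rw [mem_cands, mem_cands, h]
  unfold cval
  match hy : cands ys x, hz : cands zs x with
  | [], [] => rfl
  | [], w :: s => exact absurd ((hc w).mpr (by simp [hz])) (by simp [hy])
  | v :: r, [] => exact absurd ((hc v).mp (by simp [hy])) (by simp [hz])
  | v :: r, w :: s =>
    obtain ⟨hm1, hl1⟩ := minfold_spec r v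
    obtain ⟨hm2, hl2⟩ := minfold_spec s w
    have h1 : r.foldl min v ∈ cands zs x := (hc _).mp (by rw [hy]; exact hm1)
    have h2 : s.foldl min w ∈ cands ys x := (hc _).mpr (by rw [hz]; exact hm2)
    rw [hz] at h1; rw [hy] at h2
    exact le_antisymm (hl1 _ h2) (hl2 _ h1)

theorem cval_nonneg (ys : List Int) (x : Int) : 0 ≤ cval ys x := by
  rcases hc : cands ys x with _ | ⟨v, r⟩
  · simp [cval, hc]
  · have hmem := (minfold_spec r v).1
    have hm2 : r.foldl min v ∈ cands ys x := by rw [hc]; exact hmem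
    have := mem_cands.mp hm2
    simp only [cval, hc]
    omega

theorem dd_cons (a : Int) (t : List Int) : ∃ r, dd (a :: t) = a :: r := by
  induction t generalizing a with
  | nil => exact ⟨[], rfl⟩
  | cons b t ih =>
    by_cases h : a = b
    · subst h; obtain ⟨r, hr⟩ := ih a; exact ⟨r, by simp [dd, hr]⟩
    · exact ⟨dd (b :: t), by simp [dd, h]⟩

theorem dd_mem {l : List Int} {x : Int} : x ∈ dd l ↔ x ∈ l := by
  induction l with
  | nil => rfl
  | cons a t ih =>
    match t, ih with
    | [], _ => rfl
    | b :: t, ih =>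
      by_cases h : a = b
      · subst h; simp [dd, ih]
      · simp [dd, h, ih]

theorem dd_pairwise_lt {l : List Int} (h : l.Pairwise (fun a b => a ≤ b)) :
    (dd l).Pairwise (fun a b => a < b) := by
  induction l with
  | nil => exact .nil
  | cons a t ih =>
    match t, h with
    | [], _ => exact .cons (by simp) .nil
    | b :: t, h =>
      have h' := h.of_cons
      have hab : a ≤ b := (List.pairwise_cons.mp h).1 b (by simp)
      by_cases hq : a = b
      · subst hq; simpa [dd] using ih h'
      · simp only [dd, if_neg hq]
        refine List.pairwise_cons.mpr ⟨?_, ih h'⟩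
        intro y hy
        have hy' : y ∈ b :: t := dd_mem.mp hy
        have hb : ∀ z ∈ b :: t, a ≤ z := (List.pairwise_cons.mp h).1
        rcases List.mem_cons.mp hy' with rfl | hyt
        · omega
        · have hby : b ≤ y := (List.pairwise_cons.mp h').1 y hyt
          have := hb b (by simp); omega

theorem bigmax_adj_dd {l : List Int} (h : l.Pairwise (fun a b => a ≤ b)) :
    bigmax (adj l) = bigmax (adj (dd l)) := by
  induction l with
  | nil => rfl
  | cons a t ih =>
    match t, h with
    | [], _ => rfl
    | b :: t, h =>
      have h' := h.of_cons
      by_cases hq : a = b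
      · subst hq
        rw [show adj (a :: a :: t) = (a - a - 1) :: adj (a :: t) from rfl, bigmax_cons,
          show dd (a :: a :: t) = dd (a :: t) from by simp [dd], ← ih h']
        have := bigmax_nonneg (adj (a :: t))
        omega
      · obtain ⟨r, hr⟩ := dd_cons b t
        rw [show adj (a :: b :: t) = (b - a - 1) :: adj (b :: t) from rfl, bigmax_cons,
          show dd (a :: b :: t) = a :: dd (b :: t) from by simp [dd, hq], hr,
          show adj (a :: b :: r) = (b - a - 1) :: adj (b :: r) from rfl, bigmax_cons,
          ih h', hr]

theorem main_ind {M : List Int} (h : M.Pairwise (fun a b => a < b)) :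
    bigmax (M.map (cval M)) = bigmax (adj M) := by
  induction M with
  | nil => rfl
  | cons a t ih =>
    match t, h with
    | [], _ =>
      have hc : cands [a] a = [] := by simp [cands]
      simp [cval, hc, adj, bigmax]
    | b :: t, h =>
      have hab : a < b := (List.pairwise_cons.mp h).1 b (by simp)
      have hat : ∀ y ∈ b :: t, a < y := (List.pairwise_cons.mp h).1
      have h' := h.of_cons
      have hbt : ∀ y ∈ t, b < y := (List.pairwise_cons.mp h').1
      have hca : cval (a :: b :: t) a = b - a - 1 := by
        have h1 : cands (a :: b :: t) a = (b - a - 1) :: cands t a := by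
          rw [cands_cons_neg (by omega), cands_cons_pos hab]
        rw [cval, h1]
        exact foldl_min_eq_of_le (fun v hv => by
          obtain ⟨h2, h3⟩ := mem_cands.mp hv
          have := hbt _ h3; omega)
      have hrest : ∀ x ∈ b :: t, cval (a :: b :: t) x = cval (b :: t) x := by
        intro x hx
        have hax : ¬ x < a := by have := hat x hx; omega
        unfold cval
        rw [cands_cons_neg hax]
      have hmap : (b :: t).map (cval (a :: b :: t)) = (b :: t).map (cval (b :: t)) :=
        List.map_congr_left hrest
      calc bigmax ((a :: b :: t).map (cval (a :: b :: t)))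
          = max (b - a - 1) (bigmax ((b :: t).map (cval (b :: t)))) := by
            simp only [List.map_cons] at *
            rw [bigmax_cons, hca, hmap]
        _ = max (b - a - 1) (bigmax (adj (b :: t))) := by rw [ih h']
        _ = bigmax (adj (a :: b :: t)) := by
            rw [show adj (a :: b :: t) = (b - a - 1) :: adj (b :: t) from rfl, bigmax_cons]

theorem inner_eq (x : Int) (ys : List Int) : ∀ o : Option Int,
    ys.foldl (fun gap y =>
      if y > x then
        match gap with
        | none => some (y - x - 1)
        | some g => if y - x - 1 < g then some (y - x - 1) else some g
      else gap) o = (cands ys x).foldl om o := by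
  induction ys with
  | nil => intro o; rfl
  | cons a ys ih =>
    intro o
    by_cases ha : x < a
    · rw [cands_cons_pos ha]
      simp only [List.foldl_cons, gt_iff_lt, if_pos ha]
      rw [ih]
      congr 1
      match o with
      | none => rfl
      | some g =>
        simp only [om]
        split_ifs with h <;> · congr 1; omega
    · rw [cands_cons_neg ha]
      simp only [List.foldl_cons, gt_iff_lt, if_neg ha]
      exact ih o

theorem omfold_some (r : List Int) : ∀ g : Int, r.foldl om (some g) = some (r.foldl min g) := by
  induction r with
  | nil => intro g; rfl
  | cons v r ih => intro g; simp only [List.foldl_cons, om]; exact ih (min g v)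

theorem B_eq (xs : List Int) :
    calculate_largest_gap_alt xs =
      bigmax ((PySem.Set.ofList xs).map (cval (PySem.Set.ofList xs))) := by
  have outer : ∀ (S l : List Int) (best : Int), 0 ≤ best →
      l.foldl (fun best x =>
        match S.foldl (fun gap y =>
          if y > x then
            match gap with
            | none => some (y - x - 1)
            | some g => if y - x - 1 < g then some (y - x - 1) else some g
          else gap) none with
        | none => best
        | some g => if g > best then g else best) best
      = l.foldl (fun b x => max b (cval S x)) best := by
    intro S l
    induction l with
    | nil => intro best _; rfl
    | cons a l ih =>
      intro best hb
      simp only [List.foldl_cons]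
      have hstep : (match S.foldl (fun gap y =>
          if y > a then
            match gap with
            | none => some (y - a - 1)
            | some g => if y - a - 1 < g then some (y - a - 1) else some g
          else gap) none with
        | none => best
        | some g => if g > best then g else best) = max best (cval S a) := by
        rw [inner_eq a S none]
        rcases hc : cands S a with _ | ⟨v, r⟩
        · simp only [hc, List.foldl_nil, cval]
          omega
        · simp only [List.foldl_cons]
          rw [show om none v = some v from rfl, omfold_some r v]
          have h0 := cval_nonneg S a
          simp only [cval, hc] at h0 ⊢
          split_ifs with hgt <;> omega
      rw [hstep]
      exact ih (max best (cval S a)) (le_trans hb (le_max_left _ _))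
  show (PySem.Set.ofList xs).foldl _ 0 = _
  rw [outer (PySem.Set.ofList xs) (PySem.Set.ofList xs) 0 (le_refl 0), ← List.foldl_map]
  rfl

-- ===== VERDICT (by name: the statement is the Claim_ definition above) =====
theorem calculate_largest_gap_spec : Claim_equal_calculate_largest_gap := by
  intro xs _
  unfold Spec_calculate_largest_gap
  have hLp : (PySem.List.sorted xs (fun x => x) false).Pairwise (fun a b => a ≤ b) :=
    PySem.List.sorted_pairwise ..
  have hmem : ∀ a : Int, a ∈ dd (PySem.List.sorted xs (fun x => x) false) ↔ a ∈ PySem.Set.ofList xs := by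
    intro a
    rw [dd_mem, (PySem.List.sorted_perm ..).mem_iff, PySem.Set.mem_ofList]
  have hnodup : (dd (PySem.List.sorted xs (fun x => x) false)).Nodup :=
    (dd_pairwise_lt hLp).imp (fun h => ne_of_lt h)
  have hperm : (dd (PySem.List.sorted xs (fun x => x) false)).Perm (PySem.Set.ofList xs) :=
    (List.perm_ext_iff_of_nodup hnodup (PySem.Set.nodup_ofList xs)).mpr hmem
  rw [A_eq, B_eq]
  calc bigmax (adj (PySem.List.sorted xs (fun x => x) false))
      = bigmax (adj (dd (PySem.List.sorted xs (fun x => x) false))) := bigmax_adj_dd hLp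
    _ = bigmax ((dd (PySem.List.sorted xs (fun x => x) false)).map
        (cval (dd (PySem.List.sorted xs (fun x => x) false)))) := (main_ind (dd_pairwise_lt hLp)).symm
    _ = bigmax ((dd (PySem.List.sorted xs (fun x => x) false)).map (cval (PySem.Set.ofList xs))) := by
        rw [List.map_congr_left (fun x _ => cval_congr hmem x)]
    _ = bigmax ((PySem.Set.ofList xs).map (cval (PySem.Set.ofList xs))) :=
        bigmax_perm (hperm.map _)
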